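-- pv_equiv track=rewrite | github.com/aarushtools/imcprosperityrunner | uploads/trader.py | values_extract
-- ===== SOURCE A (Python) =====
-- def values_extract(order_dict, buy=0):
--     """
--     Helper function modeled on the friend's code.
--     For a given ordered dictionary of prices to volumes, this function calculates
--     the cumulative volume and returns the best price (depending on the side).
--     When buy == 0, we invert volumes (for sell side extraction).
--     """
--     tot_vol = 0
--     best_val = -1
--     mxvol = -1
--     for price, vol in order_dict.items():
--         if buy == 0:
--             vol *= -1  # Invert sell volumes
--         tot_vol += vol
--         if tot_vol > mxvol:
--             mxvol = tot_vol
--             best_val = price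
--     return tot_vol, best_val
-- ===== SOURCE B (Python) =====
-- def values_extract(order_dict, buy=0):
--     # B: build the cumulative-volume table first, then take total = last entry
--     # and best price = price at the first index achieving the maximum (if > -1).
--     sign = -1 if buy == 0 else 1
--     cums = []
--     running = 0
--     for vol in order_dict.values():
--         running += sign * vol
--         cums.append(running)
--     tot_vol = cums[-1] if cums else 0
--     m = max(cums, default=-1)
--     if m > -1:
--         best_val = list(order_dict)[cums.index(m)]
--     else:
--         best_val = -1
--     return tot_vol, best_val
-- ===== Notes on version B (the rewrite author's own statement) =====
-- stated objective: alternative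
-- what changed: A fuses accumulation and running-max tracking in one loop with three mutable state variables; B first materializes the cumulative-volume table, then takes the total from its last entry and the best price from the first index achieving the table's maximum (guarded by > -1).
import Mathlib
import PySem

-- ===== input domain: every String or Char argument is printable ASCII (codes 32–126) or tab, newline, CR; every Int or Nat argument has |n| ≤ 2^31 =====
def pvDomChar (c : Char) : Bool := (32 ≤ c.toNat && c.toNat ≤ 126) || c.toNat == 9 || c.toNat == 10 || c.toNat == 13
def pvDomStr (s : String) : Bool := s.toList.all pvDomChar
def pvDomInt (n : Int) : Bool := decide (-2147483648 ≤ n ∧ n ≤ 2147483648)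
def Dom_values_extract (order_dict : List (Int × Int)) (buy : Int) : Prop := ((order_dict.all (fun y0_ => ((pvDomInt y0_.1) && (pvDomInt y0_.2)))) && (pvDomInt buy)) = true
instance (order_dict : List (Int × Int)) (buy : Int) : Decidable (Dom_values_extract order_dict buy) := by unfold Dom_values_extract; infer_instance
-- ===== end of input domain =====

-- B rebuilds A's fused accumulate-and-track loop as: cumulative table, then last entry + first argmax (alternative decomposition, same cost).

-- ===== PORT A =====
-- one loop step of A: state (tot_vol, best_val, mxvol)
def stepA (buy : Int) (st : Int × Int × Int) (pv : Int × Int) : Int × Int × Int :=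
  let vol := if buy == 0 then pv.2 * (-1) else pv.2
  let tot := st.1 + vol
  if tot > st.2.2 then (tot, pv.1, tot) else (tot, st.2.1, st.2.2)

def values_extract (order_dict : List (Int × Int)) (buy : Int) : Int × Int :=
  let r := order_dict.foldl (stepA buy) (0, -1, -1)
  (r.1, r.2.1)

-- ===== PORT B =====
-- the cumulative-sum table ("cums" in Source B), built left to right
def cumsFrom (s : Int) : List Int → List Int
  | [] => []
  | v :: r => (s + v) :: cumsFrom (s + v) r

def values_extract_alt (order_dict : List (Int × Int)) (buy : Int) : Int × Int :=
  let sign : Int := if buy == 0 then -1 else 1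
  let cums := cumsFrom 0 (order_dict.map (fun pv => sign * pv.2))
  let tot_vol := match cums.getLast? with | some x => x | none => 0          -- cums[-1] if cums else 0
  let m := match cums with | [] => (-1 : Int) | x :: xs => xs.foldl max x    -- max(cums, default=-1)
  let best_val :=
    if m > -1 then
      match PySem.List.index? cums m with                                    -- cums.index(m): always found here
      | some i => (PySem.List.pyGet? (order_dict.map Prod.fst) (i : Int)).getD (-1)
      | none => (-1 : Int)
    else (-1 : Int)
  (tot_vol, best_val)

-- ===== PRECONDITION & SPEC =====
def Spec_values_extract (order_dict : List (Int × Int)) (buy : Int) (out : Int × Int) : Prop := out = values_extract_alt order_dict buy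
instance (order_dict : List (Int × Int)) (buy : Int) (out : Int × Int) : Decidable (Spec_values_extract order_dict buy out) := by unfold Spec_values_extract; infer_instance

-- ===== CLAIM (what is proved, stated in full; the proofs are below) =====
def Claim_equal_values_extract : Prop := ∀ (order_dict : List (Int × Int)) (buy : Int), Dom_values_extract order_dict buy → Spec_values_extract order_dict buy (values_extract order_dict buy)

-- ===== LEMMAS AND PROOFS =====

-- price at the first index of cs holding value t (as B computes it)
def priceAt (cs ps : List Int) (t : Int) : Int :=
  match PySem.List.index? cs t with
  | some i => (PySem.List.pyGet? ps (i : Int)).getD (-1)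
  | none => (-1 : Int)

lemma priceAt_cons_self (c p : Int) (cs ps : List Int) : priceAt (c :: cs) (p :: ps) c = p := by
  rw [priceAt, PySem.List.index?_cons_self]
  simp

lemma priceAt_cons_ne (c p t : Int) (cs ps : List Int) (h : c ≠ t) :
    priceAt (c :: cs) (p :: ps) t = priceAt cs ps t := by
  rw [priceAt, priceAt, PySem.List.index?_cons_of_ne cs h]
  cases hidx : PySem.List.index? cs t with
  | none => simp
  | some i =>
      simp only [Option.map_some]
      have h1 : PySem.List.pyGet? (p :: ps) ((i + 1 : Nat) : Int) = (p :: ps)[(i+1)]? :=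
        PySem.List.pyGet?_natCast _ _
      have h2 : PySem.List.pyGet? ps ((i : Nat) : Int) = ps[i]? :=
        PySem.List.pyGet?_natCast _ _
      simp [h2]

lemma foldl_max_max (l : List Int) : ∀ a b : Int, l.foldl max (max a b) = max a (l.foldl max b) := by
  induction l with
  | nil => intro a b; simp
  | cons x xs ih => intro a b; simp only [List.foldl_cons, max_assoc]; exact ih a (max b x)

-- the sign-adjusted volume, exactly as A computes it
def adjF (buy : Int) (pv : Int × Int) : Int := if buy == 0 then pv.2 * (-1) else pv.2

-- full characterization of A's loop state
lemma foldA_char (buy : Int) : ∀ (od : List (Int × Int)) (s b m : Int),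
    od.foldl (stepA buy) (s, b, m) =
      (s + (od.map (adjF buy)).sum,
       (if List.foldl max m (cumsFrom s (od.map (adjF buy))) > m
        then priceAt (cumsFrom s (od.map (adjF buy))) (od.map Prod.fst)
               (List.foldl max m (cumsFrom s (od.map (adjF buy))))
        else b),
       List.foldl max m (cumsFrom s (od.map (adjF buy)))) := by
  intro od
  induction od with
  | nil => intro s b m; simp [cumsFrom]
  | cons pv rest ih =>
      intro s b m
      have hstep : stepA buy (s, b, m) pv =
          if s + adjF buy pv > m then (s + adjF buy pv, pv.1, s + adjF buy pv)
          else (s + adjF buy pv, b, m) := by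
        simp only [stepA, adjF]
      rw [List.foldl_cons, hstep]
      simp only [List.map_cons, List.sum_cons, cumsFrom, List.foldl_cons]
      by_cases h : s + adjF buy pv > m
      · rw [if_pos h, ih]
        have hmc : max m (s + adjF buy pv) = s + adjF buy pv := max_eq_right h.le
        rw [hmc]
        have hcle : s + adjF buy pv ≤
            List.foldl max (s + adjF buy pv) (cumsFrom (s + adjF buy pv) (rest.map (adjF buy))) :=
          (PySem.List.le_foldl_max _ _).1
        simp only [Prod.mk.injEq]
        refine ⟨by ring, ?_, trivial⟩
        by_cases h2 : List.foldl max (s + adjF buy pv)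
            (cumsFrom (s + adjF buy pv) (rest.map (adjF buy))) > s + adjF buy pv
        · rw [if_pos h2, if_pos (lt_trans h h2), priceAt_cons_ne _ _ _ _ _ (ne_of_lt h2)]
        · have heq : List.foldl max (s + adjF buy pv)
              (cumsFrom (s + adjF buy pv) (rest.map (adjF buy))) = s + adjF buy pv :=
            le_antisymm (not_lt.mp h2) hcle
          rw [if_neg h2, heq, if_pos h, priceAt_cons_self]
      · rw [if_neg h, ih]
        have hmc : max m (s + adjF buy pv) = m := max_eq_left (not_lt.mp h)
        rw [hmc]
        simp only [Prod.mk.injEq]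
        refine ⟨by ring, ?_, trivial⟩
        by_cases h2 : List.foldl max m (cumsFrom (s + adjF buy pv) (rest.map (adjF buy))) > m
        · have hne : s + adjF buy pv ≠
              List.foldl max m (cumsFrom (s + adjF buy pv) (rest.map (adjF buy))) := by
            have := not_lt.mp h; omega
          rw [if_pos h2, if_pos h2, priceAt_cons_ne _ _ _ _ _ hne]
        · rw [if_neg h2, if_neg h2]

lemma cumsFrom_getLastD (l : List Int) : ∀ s : Int, (cumsFrom s l).getLastD s = s + l.sum := by
  induction l with
  | nil => intro s; simp [cumsFrom]
  | cons v r ih =>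
      intro s
      show ((s + v) :: cumsFrom (s + v) r).getLastD s = _
      rw [List.getLastD_cons, ih (s + v)]
      simp [add_assoc]

lemma adjF_eq_sign (buy : Int) :
    (fun pv : Int × Int => (if buy == 0 then (-1 : Int) else 1) * pv.2) = adjF buy := by
  funext pv; simp only [adjF]; split <;> ring

-- ===== VERDICT (by name: the statement is the Claim_ definition above) =====
theorem values_extract_spec : Claim_equal_values_extract := by
  intro od buy _
  show values_extract od buy = values_extract_alt od buy
  simp only [values_extract, values_extract_alt]
  rw [adjF_eq_sign buy, foldA_char buy od 0 (-1) (-1)]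
  simp only [zero_add]
  cases hc : cumsFrom 0 (od.map (adjF buy)) with
  | nil =>
      have hsum0 : (od.map (adjF buy)).sum = 0 := by
        cases od with
        | nil => simp
        | cons pv r => simp [cumsFrom] at hc
      simp [hsum0]
  | cons x xs =>
      have hsum : (x :: xs).getLastD 0 = (od.map (adjF buy)).sum := by
        have h0 := cumsFrom_getLastD (od.map (adjF buy)) 0
        rw [hc] at h0
        simpa using h0
      have hlast : (match (x :: xs).getLast? with | some y => y | none => (0:Int)) =
          (x :: xs).getLastD 0 := by
        cases h : (x :: xs).getLast? <;> simp [List.getLastD_eq_getLast?, h]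
      have hmax : List.foldl max (-1 : Int) (x :: xs) = max (-1) (List.foldl max x xs) := by
        rw [List.foldl_cons]
        exact foldl_max_max xs (-1) x
      rw [hmax]
      simp only [Prod.mk.injEq]
      constructor
      · rw [hlast, hsum]
      · by_cases hpos : List.foldl max x xs > -1
        · have hM : max (-1 : Int) (List.foldl max x xs) = List.foldl max x xs :=
            max_eq_right hpos.le
          rw [hM, if_pos hpos, if_pos hpos]
          rfl
        · have hM : max (-1 : Int) (List.foldl max x xs) = -1 :=
            max_eq_left (not_lt.mp hpos)
          rw [hM, if_neg (lt_irrefl (-1 : Int)), if_neg hpos]
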